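-- pv_equiv track=rewrite | github.com/goc9000/baon | src/logic/grammar_utils.py | format_numerals
-- ===== SOURCE A (Python) =====
-- def plural(word):
--     # Incomplete and buggy, of course; word must be lowercase
--     if len(word) == 1:
--         return word + "'s"
--     if word[-1] == 'y' and word[-2] not in {'a', 'e', 'i', 'o', 'u'}:
--         return word[:-1] + "ies"
--     if word[-2:] in ('sh', 'ch'):
--         return word + "es"
--
--     return word + "s"
--
-- def format_numeral(item_name_singular, item_count):
--     name = item_name_singular if item_count == 1 else plural(item_name_singular)
--
--     return "{0} {1}".format(item_count, name)
--
-- def format_numerals(counts, omit_zero_entries=True, value_if_nothing='nothing'):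
--     parts = []
--
--     if omit_zero_entries:
--         counts = [item for item in counts if item[1] > 0]
--
--     for i, item in enumerate(counts):
--         if i > 0:
--             parts.append(', ' if i != len(counts)-1 else ' and ')
--
--         parts.append(format_numeral(item[0], item[1]))
--
--     if len(parts) == 0:
--         return value_if_nothing
--
--     return ''.join(parts)
-- ===== SOURCE B (Python) =====
-- def plural(word):
--     # Incomplete and buggy, of course; word must be lowercase
--     if len(word) == 1:
--         return word + "'s"
--     if word[-1] == 'y' and word[-2] not in {'a', 'e', 'i', 'o', 'u'}:
--         return word[:-1] + "ies"
--     if word[-2:] in ('sh', 'ch'):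
--         return word + "es"
--
--     return word + "s"
--
-- def format_numeral(item_name_singular, item_count):
--     name = item_name_singular if item_count == 1 else plural(item_name_singular)
--
--     return "{0} {1}".format(item_count, name)
--
-- def glue(strs):
--     # Recursively stitch the phrase front-to-back: the separator before the
--     # next word depends only on how many words remain, not on an index.
--     if len(strs) == 1:
--         return strs[0]
--     if len(strs) == 2:
--         return strs[0] + ' and ' + strs[1]
--     return strs[0] + ', ' + glue(strs[1:])
--
-- def format_numerals(counts, omit_zero_entries=True, value_if_nothing='nothing'):
--     strs = [format_numeral(name, count)
--             for name, count in counts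
--             if count > 0 or not omit_zero_entries]
--     return glue(strs) if strs else value_if_nothing
-- ===== Notes on version B (the rewrite author's own statement) =====
-- stated objective: alternative
-- what changed: B replaces A's indexed enumerate-loop (which interleaves a per-position separator chosen by comparing i against len-1 into a parts list and then ''.join-s it) with a recursive stitcher: filter+format once, then glue builds the phrase front-to-back by recursion, choosing ' and ' vs ', ' purely from how many words remain (pattern on list length), with no index arithmetic and no parts list.
import Mathlib
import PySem

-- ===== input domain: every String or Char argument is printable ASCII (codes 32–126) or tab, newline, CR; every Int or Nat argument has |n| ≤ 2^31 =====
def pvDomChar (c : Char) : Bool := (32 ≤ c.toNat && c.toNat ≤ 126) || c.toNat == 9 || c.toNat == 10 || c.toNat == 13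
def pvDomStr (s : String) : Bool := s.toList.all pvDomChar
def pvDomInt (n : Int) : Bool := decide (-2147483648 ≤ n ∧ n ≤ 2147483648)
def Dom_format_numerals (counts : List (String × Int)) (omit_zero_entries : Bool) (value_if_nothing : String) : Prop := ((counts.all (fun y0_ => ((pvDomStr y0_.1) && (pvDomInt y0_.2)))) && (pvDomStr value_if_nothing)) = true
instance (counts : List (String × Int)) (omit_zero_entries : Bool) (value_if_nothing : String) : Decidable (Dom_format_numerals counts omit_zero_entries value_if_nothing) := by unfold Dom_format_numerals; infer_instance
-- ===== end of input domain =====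

-- B replaces A's indexed separator-interleaving loop + join by a recursive stitcher that
-- picks the separator from how many words remain (alternative decomposition, same cost).

-- ===== PORT A =====
-- shared module helper: plural(word).  Python's word[-1]/word[-2] raise IndexError on the
-- empty word (reached only when len(word) != 1); the pyGet?-getD ' ' totalization is only
-- hit there, and Pre_format_numerals excludes those inputs.
def plural (word : String) : String :=
  if PySem.Str.len word = 1 then word ++ "'s"
  else if (PySem.Str.pyGet? word (-1)).getD ' ' = 'y' ∧
          (PySem.Str.pyGet? word (-2)).getD ' ' ∉ ['a', 'e', 'i', 'o', 'u'] then
    PySem.Str.slice word none (some (-1)) ++ "ies"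
  else if PySem.Str.slice word (some (-2)) none ∈ ["sh", "ch"] then word ++ "es"
  else word ++ "s"

-- shared module helper: format_numeral; "{0} {1}".format(item_count, name)
def format_numeral (item_name_singular : String) (item_count : Int) : String :=
  let name := if item_count = 1 then item_name_singular else plural item_name_singular
  PySem.Int.toStr item_count ++ " " ++ name

def format_numerals (counts : List (String × Int)) (omit_zero_entries : Bool) (value_if_nothing : String) : String :=
  let counts := if omit_zero_entries then counts.filter (fun item => item.2 > 0) else counts
  let parts : List String :=
    (PySem.List.enumerate counts).foldl
      (fun parts x =>
        let parts := if x.1 > 0 then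
            parts ++ [if x.1 ≠ (counts.length : Int) - 1 then ", " else " and "]
          else parts
        parts ++ [format_numeral x.2.1 x.2.2])
      []
  if parts.length = 0 then value_if_nothing
  else PySem.Str.join "" parts

-- ===== PORT B =====
-- Source B's glue: recursion on the word list, separator chosen by remaining length
def glue : List String → String
  | [] => ""            -- unreachable: Source B calls glue only on nonempty strs
  | [s] => s
  | [s, t] => s ++ " and " ++ t
  | s :: rest => s ++ ", " ++ glue rest

def format_numerals_alt (counts : List (String × Int)) (omit_zero_entries : Bool) (value_if_nothing : String) : String :=
  let strs := (counts.filter (fun p => p.2 > 0 || !omit_zero_entries)).map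
      (fun p => format_numeral p.1 p.2)
  if strs ≠ [] then glue strs else value_if_nothing

-- ===== PRECONDITION & SPEC =====
-- Pre_ excludes exactly the inputs where Python A raises IndexError: a surviving item whose
-- name is the empty string and whose count is not 1 makes plural("") evaluate word[-1].
def Pre_format_numerals (counts : List (String × Int)) (omit_zero_entries : Bool) (value_if_nothing : String) : Prop :=
  ∀ p ∈ counts, p.1 ≠ "" ∨ p.2 = 1 ∨ (omit_zero_entries = true ∧ p.2 ≤ 0)
instance (counts : List (String × Int)) (omit_zero_entries : Bool) (value_if_nothing : String) : Decidable (Pre_format_numerals counts omit_zero_entries value_if_nothing) := by unfold Pre_format_numerals; infer_instance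

def pvWitness_format_numerals : (List (String × Int)) × Bool × String :=
  ([("file", 2), ("error", 1), ("match", 0)], true, "nothing")

def Spec_format_numerals (counts : List (String × Int)) (omit_zero_entries : Bool) (value_if_nothing : String) (out : String) : Prop := out = format_numerals_alt counts omit_zero_entries value_if_nothing
instance (counts : List (String × Int)) (omit_zero_entries : Bool) (value_if_nothing : String) (out : String) : Decidable (Spec_format_numerals counts omit_zero_entries value_if_nothing out) := by unfold Spec_format_numerals; infer_instance

-- ===== CLAIM (what is proved, stated in full; the proofs are below) =====
def Claim_equal_format_numerals : Prop := ∀ (counts : List (String × Int)) (omit_zero_entries : Bool) (value_if_nothing : String), Dom_format_numerals counts omit_zero_entries value_if_nothing → Pre_format_numerals counts omit_zero_entries value_if_nothing → Spec_format_numerals counts omit_zero_entries value_if_nothing (format_numerals counts omit_zero_entries value_if_nothing)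

-- ===== LEMMAS AND PROOFS =====

-- A's parts list, element-for-element: the tail of the interleaved fragments
def interTail : List String → List String
  | [] => []
  | [s] => [" and ", s]
  | s :: t => ", " :: s :: interTail t

theorem joinNil_eq_flatten (l : List (List Char)) : PySem.Chars.join [] l = l.flatten := by
  induction l with
  | nil => simp [PySem.Chars.join_nil]
  | cons a r ih =>
    cases r with
    | nil => simp [PySem.Chars.join_singleton]
    | cons b r' => simp [PySem.Chars.join_cons_cons] at *; simpa using ih

theorem parts_eq_interTail {α : Type} (f : α → String) (n : Int) :
    ∀ (xs : List α) (k : Int), 1 ≤ k → k + xs.length = n →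
    (PySem.List.enumerate xs k).flatMap
      (fun x => (if x.1 > 0 then [if x.1 ≠ n - 1 then ", " else " and "] else []) ++ [f x.2])
      = interTail (xs.map f) := by
  intro xs
  induction xs with
  | nil => intro k _ _; simp [PySem.List.enumerate_nil, interTail]
  | cons x t ih =>
    intro k hk hn
    rw [PySem.List.enumerate_cons]
    cases t with
    | nil =>
      have hk' : k = n - 1 := by simp at hn; omega
      have h1 : (1:Int) < n := by omega
      simp [interTail, hk', h1]
    | cons y t' =>
      have hne : k ≠ n - 1 := by simp at hn; omega
      have := ih (k + 1) (by omega) (by simp at hn ⊢; omega)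
      simp only [List.flatMap_cons, this]
      simp [interTail, hne, show (0:Int) < k from by omega]

-- ''.join of A's fragment list equals B's recursive glue
theorem join_interTail_eq_glue (ts : List String) :
    ∀ (s : String), PySem.Str.join "" (s :: interTail ts) = glue (s :: ts) := by
  induction ts with
  | nil =>
    intro s
    apply String.toList_inj.mp
    simp [interTail, glue, PySem.Str.toList_join, PySem.Chars.join_singleton]
  | cons t ts' ih =>
    intro s
    cases ts' with
    | nil =>
      apply String.toList_inj.mp
      simp [interTail, glue, PySem.Str.toList_join, joinNil_eq_flatten, String.toList_append]
    | cons u ts'' =>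
      have ihh := congrArg String.toList (ih t)
      apply String.toList_inj.mp
      rw [show interTail (t :: u :: ts'') = ", " :: t :: interTail (u :: ts'') from rfl,
          show glue (s :: t :: u :: ts'') = s ++ ", " ++ glue (t :: u :: ts'') from rfl]
      have h0 : ("" : String).toList = [] := rfl
      simp only [PySem.Str.toList_join, String.toList_append, h0, joinNil_eq_flatten,
                 List.map_cons, List.flatten_cons, List.append_assoc] at ihh ⊢
      rw [ihh]

-- ===== VERDICT (by name: the statement is the Claim_ definition above) =====
theorem format_numerals_spec : Claim_equal_format_numerals := by
  intro counts oze vin _ _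
  unfold Spec_format_numerals format_numerals format_numerals_alt
  have hfil : (if oze then counts.filter (fun item => item.2 > 0) else counts)
      = counts.filter (fun p => p.2 > 0 || !oze) := by
    cases oze
    · simp
    · simp
  rw [hfil]
  generalize counts.filter (fun p => p.2 > 0 || !oze) = cs
  have hstep : (fun (parts : List String) (x : Int × (String × Int)) =>
        (if x.1 > 0 then
            parts ++ [if x.1 ≠ ((cs.length : Int)) - 1 then ", " else " and "]
          else parts) ++ [format_numeral x.2.1 x.2.2])
      = fun parts x => parts ++
          ((if x.1 > 0 then [if x.1 ≠ ((cs.length : Int)) - 1 then ", " else " and "] else [])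
            ++ [format_numeral x.2.1 x.2.2]) := by
    funext parts x
    by_cases h : x.1 > 0 <;> simp [h]
  simp only [hstep, PySem.List.foldl_append_eq_flatMap, List.nil_append]
  cases cs with
  | nil => simp [PySem.List.enumerate_nil]
  | cons c cs' =>
    rw [PySem.List.enumerate_cons,
        show ((0:Int), c) :: PySem.List.enumerate cs' (0 + 1)
          = ((0:Int), c) :: PySem.List.enumerate cs' 1 from by norm_num]
    rw [List.flatMap_cons,
        parts_eq_interTail (fun p => format_numeral p.1 p.2) ((c :: cs').length : Int) cs' 1
          (by omega) (by push_cast [List.length_cons]; omega)]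
    simp only [gt_iff_lt, lt_self_iff_false, if_false, List.nil_append, List.singleton_append]
    have hlen : (format_numeral c.1 c.2 :: interTail (List.map (fun p => format_numeral p.1 p.2) cs')).length ≠ 0 := by
      simp
    rw [if_neg hlen]
    have hne : (List.map (fun p => format_numeral p.1 p.2) (c :: cs')) ≠ [] := by simp
    rw [if_pos hne, List.map_cons]
    exact join_interTail_eq_glue _ _
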